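-- pv_equiv track=rewrite | github.com/extybr/python-basik | module20/03_function/main.py | transform
-- ===== SOURCE A (Python) =====
-- def transform(data, element):
--     selection = list()
--     count = 0
--     # for index in range(len(crypto_text)): // для глубины
--     for item in data:
--         if item == element:
--             count += 1
--         if count == 1:
--             selection.append(item)
--         elif count == 2:
--             selection.append(item)
--             return tuple(selection)
--     return tuple(selection)
-- ===== SOURCE B (Python) =====
-- def transform(data, element):
--     # index-then-slice instead of A's counter-driven streaming pass
--     try:
--         start = data.index(element)
--     except ValueError:
--         return ()
--     try:
--         rel = data[start + 1:].index(element)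
--     except ValueError:
--         return tuple(data[start:])
--     return tuple(data[start:start + rel + 2])
-- ===== Notes on version B (the rewrite author's own statement) =====
-- stated objective: alternative
-- what changed: Replaced A's single counter-driven streaming pass (count of occurrences driving conditional appends with an early return) by an index-then-slice computation: find the first occurrence with list.index, find the second in the tail, and return one slice spanning them.
import Mathlib
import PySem

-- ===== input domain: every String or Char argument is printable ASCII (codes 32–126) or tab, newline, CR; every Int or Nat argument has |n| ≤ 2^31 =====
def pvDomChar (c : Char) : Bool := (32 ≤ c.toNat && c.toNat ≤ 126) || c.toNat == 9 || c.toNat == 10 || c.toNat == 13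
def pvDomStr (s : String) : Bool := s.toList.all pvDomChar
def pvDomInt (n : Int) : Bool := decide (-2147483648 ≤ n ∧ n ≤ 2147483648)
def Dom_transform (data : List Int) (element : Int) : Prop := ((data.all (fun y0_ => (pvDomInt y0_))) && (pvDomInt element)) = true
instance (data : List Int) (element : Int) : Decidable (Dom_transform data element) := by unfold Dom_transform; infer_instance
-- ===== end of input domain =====

-- B replaces A's counter-driven streaming pass by index-then-slice (alternative decomposition, same cost).

-- ===== PORT A =====
-- the for-loop with its (count, selection) state, branches in source order
def transformA_go (element : Int) : List Int → Nat → List Int → List Int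
  | [], _, sel => sel
  | item :: rest, count, sel =>
    let count := if item = element then count + 1 else count
    if count = 1 then transformA_go element rest count (sel ++ [item])
    else if count = 2 then sel ++ [item]
    else transformA_go element rest count sel

def transform (data : List Int) (element : Int) : List Int :=
  transformA_go element data 0 []

-- ===== PORT B =====
def transform_alt (data : List Int) (element : Int) : List Int :=
  match PySem.List.index? data element with
  | none => []
  | some start =>
    match PySem.List.index? (PySem.List.slice data (some ((start : Int) + 1)) none) element with
    | none => PySem.List.slice data (some (start : Int)) none
    | some rel => PySem.List.slice data (some (start : Int)) (some ((start : Int) + rel + 2))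

-- ===== PRECONDITION & SPEC =====
def Spec_transform (data : List Int) (element : Int) (out : List Int) : Prop := out = transform_alt data element
instance (data : List Int) (element : Int) (out : List Int) : Decidable (Spec_transform data element out) := by unfold Spec_transform; infer_instance

-- ===== CLAIM (what is proved, stated in full; the proofs are below) =====
def Claim_equal_transform : Prop := ∀ (data : List Int) (element : Int), Dom_transform data element → Spec_transform data element (transform data element)

-- ===== LEMMAS AND PROOFS =====

-- after the first occurrence (count = 1), A keeps everything up to and including the next occurrence
lemma transformA_go_zero_cons_self (element : Int) (t : List Int) :
    transformA_go element (element :: t) 0 [] = transformA_go element t 1 [element] := by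
  simp [transformA_go]

lemma transformA_go_zero_cons_ne (element h : Int) (t : List Int) (hh : h ≠ element) :
    transformA_go element (h :: t) 0 [] = transformA_go element t 0 [] := by
  simp [transformA_go, hh]

lemma transformA_go_one (element : Int) (rest sel : List Int) :
    transformA_go element rest 1 sel =
      sel ++ (match PySem.List.index? rest element with
              | none => rest
              | some k => rest.take (k + 1)) := by
  induction rest generalizing sel with
  | nil => simp [transformA_go, PySem.List.index?_eq_idxOf?]
  | cons x t ih =>
    by_cases hx : x = element
    · subst hx
      rw [PySem.List.index?_cons_self]
      simp [transformA_go]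
    · rw [PySem.List.index?_cons_of_ne t hx]
      simp only [transformA_go, if_neg hx]
      rw [ih (sel ++ [x])]
      cases h : PySem.List.index? t element with
      | none => simp
      | some k => simp [List.take_succ_cons]

lemma transform_eq_alt (data : List Int) (element : Int) :
    transform data element = transform_alt data element := by
  induction data with
  | nil => simp [transform, transformA_go, transform_alt, PySem.List.index?_eq_idxOf?]
  | cons h t ih =>
    by_cases hh : h = element
    · subst hh
      unfold transform transform_alt
      rw [PySem.List.index?_cons_self, transformA_go_zero_cons_self, transformA_go_one]
      dsimp only
      have e1 : ((0 : Nat) : Int) + 1 = ((1 : Nat) : Int) := by norm_num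
      rw [e1, PySem.List.slice_from_natCast]
      cases hk : PySem.List.index? (List.drop 1 (h :: t)) h with
      | none =>
        simp only [List.drop_succ_cons, List.drop_zero] at hk
        rw [hk, PySem.List.slice_from_natCast]
        simp
      | some rel =>
        simp only [List.drop_succ_cons, List.drop_zero] at hk
        rw [hk]
        dsimp only
        have e2 : ((0 : Nat) : Int) + (rel : Int) + 2 = ((rel + 2 : Nat) : Int) := by
          push_cast; ring
        rw [e2, PySem.List.slice_natCast]
        simp [List.take_succ_cons]
    · unfold transform transform_alt
      rw [PySem.List.index?_cons_of_ne t hh, transformA_go_zero_cons_ne element h t hh]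
      have ih' := ih
      unfold transform transform_alt at ih'
      cases hs : PySem.List.index? t element with
      | none => rw [hs] at ih'; simpa using ih'
      | some s =>
        rw [hs] at ih'
        simp only [Option.map_some]
        dsimp only at ih'
        have e1 : ((s : Int)) + 1 = ((s + 1 : Nat) : Int) := by push_cast; ring
        have e2 : ((s + 1 : Nat) : Int) + 1 = ((s + 2 : Nat) : Int) := by push_cast; ring
        rw [e2, PySem.List.slice_from_natCast,
          show List.drop (s + 2) (h :: t) = List.drop (s + 1) t from
            by rw [show s + 2 = (s + 1) + 1 from rfl, List.drop_succ_cons]]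
        rw [e1, PySem.List.slice_from_natCast] at ih'
        cases hk : PySem.List.index? (List.drop (s + 1) t) element with
        | none =>
          rw [hk] at ih'
          dsimp only at ih' ⊢
          rw [PySem.List.slice_from_natCast] at ih'
          rw [PySem.List.slice_from_natCast, List.drop_succ_cons]
          exact ih'
        | some rel =>
          rw [hk] at ih'
          dsimp only at ih' ⊢
          have e3 : ((s : Int)) + (rel : Int) + 2 = ((s + rel + 2 : Nat) : Int) := by
            push_cast; ring
          have e4 : ((s + 1 : Nat) : Int) + (rel : Int) + 2 = ((s + 1 + rel + 2 : Nat) : Int) := by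
            push_cast; ring
          rw [e3, PySem.List.slice_natCast] at ih'
          rw [e4, PySem.List.slice_natCast, List.drop_succ_cons]
          have e5 : s + 1 + rel + 2 - (s + 1) = s + rel + 2 - s := by omega
          rw [e5]
          exact ih'

-- ===== VERDICT (by name: the statement is the Claim_ definition above) =====
theorem transform_spec : Claim_equal_transform := by
  intro data element _
  unfold Spec_transform
  exact transform_eq_alt data element
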